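-- pv_equiv track=rewrite | github.com/toppyy/sqltablerefs | sqltablerefs.py | find_CTEs
-- ===== SOURCE A (Python) =====
-- def peek(arr):
--     if len(arr) == 0:
--         raise "Peeked at an empty array!"
--     return arr[0]
--
-- def eat_subquery(tokens):
--     # Eat tokens until the subquery/expression in parenthesis is removed
--     cur = peek(tokens)
--     while cur != ')':
--         if cur == '(':
--             tokens.pop(0)
--             eat_subquery(tokens)
--         tokens.pop(0)
--         cur = peek(tokens)
--
-- def find_CTEs(tokens):
--     # Returns the aliases for CTEs (if any)
--     # aliases are lowercased for case-insensitive comparison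
--     if len(tokens) == 0:
--         return set()
--
--     # Check if the query has a WITH-statement
--     while len(tokens) > 0:
--         if peek(tokens) == 'WITH':
--             break
--         tokens.pop(0)
--
--     if len(tokens) == 0:
--         # It does not -> return an empty set
--         return set()
--
--     # Remove 'WITH'
--     tokens.pop(0)
--
--     # If the SQL is syntactically correct
--     # there first alias is the next token
--     CTE = [tokens.pop(0)]
--     tokens.pop(0) # AS
--
--     cur = tokens.pop(0)
--
--     while  len(tokens) > 0:
--
--         if cur == '(':
--             eat_subquery(tokens)
--         cur = tokens.pop(0)
--
--         if cur == ')':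
--             cur = tokens.pop(0)
--             if cur == 'SELECT':
--                 break
--
--             CTE.append(tokens.pop(0))
--
--     return set([alias.lower() for alias in CTE])
-- ===== SOURCE B (Python) =====
-- def find_CTEs(tokens):
--     # Single index scan with an explicit parenthesis-depth counter instead of
--     # recursive eat_subquery + destructive pops; does NOT mutate tokens.
--     if 'WITH' not in tokens:
--         return set()
--     i = tokens.index('WITH') + 1
--     aliases = [tokens[i]]
--     cur = tokens[i + 2]
--     depth = 1 if cur == '(' else 0
--     i += 3
--     n = len(tokens)
--     while i < n:
--         cur = tokens[i]
--         i += 1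
--         if cur == '(':
--             depth += 1
--         elif cur == ')':
--             if depth > 1:
--                 depth -= 1
--             else:
--                 nxt = tokens[i]
--                 if nxt == 'SELECT':
--                     break
--                 aliases.append(tokens[i + 1])
--                 i += 2
--                 depth = 1 if nxt == '(' else 0
--     return {a.lower() for a in aliases}
-- ===== Notes on version B (the rewrite author's own statement) =====
-- stated objective: faster
-- what changed: Replaces the recursive eat_subquery plus destructive pop(0) consumption with a single non-mutating index scan that tracks an explicit parenthesis-depth counter.
import Mathlib
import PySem

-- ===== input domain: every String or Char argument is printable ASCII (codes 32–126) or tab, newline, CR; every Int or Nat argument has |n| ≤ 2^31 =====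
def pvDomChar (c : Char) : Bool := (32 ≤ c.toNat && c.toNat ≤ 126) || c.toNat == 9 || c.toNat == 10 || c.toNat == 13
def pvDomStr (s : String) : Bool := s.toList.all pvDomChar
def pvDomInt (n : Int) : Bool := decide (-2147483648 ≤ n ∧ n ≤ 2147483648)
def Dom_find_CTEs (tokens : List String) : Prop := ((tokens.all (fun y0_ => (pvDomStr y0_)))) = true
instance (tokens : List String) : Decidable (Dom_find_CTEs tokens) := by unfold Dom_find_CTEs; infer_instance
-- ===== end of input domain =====

-- B replaces A's recursive eat_subquery + destructive pop(0) scanning by one index walk with an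
-- explicit parenthesis-depth counter (and does NOT mutate the caller's token list, unlike A);
-- the equivalence proved is about the RETURN value only.

-- ===== PORT A =====
-- while peek != 'WITH': pop  (returns the remaining list, head = 'WITH' if found)
def dropToWithA : List String → List String
  | [] => []
  | t :: ts => if t = "WITH" then t :: ts else dropToWithA ts

-- eat_subquery: returns the remaining token list (head = the unmatched ')'), none = raise.
-- fuel counts recursive steps; each non-terminal call recurses on a strictly shorter list,
-- so fuel = length + 1 at the call site is always sufficient.
def eatA : Nat → List String → Option (List String)
  | 0, _ => none
  | _ + 1, [] => none                       -- peek raises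
  | fuel + 1, cur :: rest =>
    if cur = ")" then some (cur :: rest)    -- loop exit: ')' left at head
    else if cur = "(" then
      match eatA fuel rest with             -- pop '(' then recurse
      | none => none
      | some [] => none                     -- pop raises
      | some (_ :: ts) => eatA fuel ts      -- pop, cur = peek, continue loop
    else eatA fuel rest                     -- pop, cur = peek, continue loop

-- the main while-loop of find_CTEs: state (cur, CTE, tokens); none = raise
def findLoopA : Nat → String → List String → List String → Option (List String)
  | 0, _, _, _ => none
  | fuel + 1, cur, cte, tokens =>
    if 0 < tokens.length then
      match (if cur = "(" then eatA (tokens.length + 1) tokens else some tokens) with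
      | none => none
      | some ts =>
        match ts with
        | [] => none                        -- pop raises
        | c :: ts1 =>
          if c = ")" then
            match ts1 with
            | [] => none                    -- pop raises
            | c2 :: ts2 =>
              if c2 = "SELECT" then some cte     -- break
              else
                match ts2 with
                | [] => none                -- pop raises
                | al :: ts3 => findLoopA fuel c2 (cte ++ [al]) ts3
          else findLoopA fuel c cte ts1
    else some cte

def find_CTEs (tokens : List String) : List String :=
  if tokens.length = 0 then [] else
  match dropToWithA tokens with
  | [] => []                                -- no WITH: empty set
  | _ :: r =>                               -- pop 'WITH'
    match r with
    | a :: _ :: c :: rest2 =>               -- CTE = [pop]; pop AS; cur = pop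
      match findLoopA (rest2.length + 1) c [a] rest2 with
      | none => []                          -- raise: excluded by Pre_
      | some cte => PySem.Set.ofList (cte.map PySem.Str.lower)
    | _ => []                               -- pop raises: excluded by Pre_

-- ===== PORT B =====
-- single scan, d = open-parenthesis depth; [] on the index-error paths (excluded by Pre_)
def loopB : List String → Nat → List String → List String
  | [], _, acc => acc
  | t :: ts, d, acc =>
    if t = "(" then loopB ts (d + 1) acc
    else if t = ")" then
      if 1 < d then loopB ts (d - 1) acc
      else
        match ts with
        | [] => []                          -- IndexError: excluded by Pre_
        | nxt :: ts2 =>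
          if nxt = "SELECT" then acc
          else
            match ts2 with
            | [] => []                      -- IndexError: excluded by Pre_
            | al :: ts3 => loopB ts3 (if nxt = "(" then 1 else 0) (acc ++ [al])
    else loopB ts d acc

def find_CTEs_alt (tokens : List String) : List String :=
  match tokens.dropWhile (fun t => t ≠ "WITH") with
  | [] => []                                -- 'WITH' not in tokens
  | _ :: r =>                               -- tokens after the first 'WITH'
    match r with
    | a :: r1 =>
      match r1 with
      | _ :: r2 =>
        match r2 with
        | c :: rest2 =>
          PySem.Set.ofList ((loopB rest2 (if c = "(" then 1 else 0) [a]).map PySem.Str.lower)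
        | [] => []                          -- IndexError: excluded by Pre_
      | [] => []                            -- IndexError: excluded by Pre_
    | [] => []                              -- IndexError: excluded by Pre_

-- ===== PRECONDITION & SPEC =====
-- Pre_ excludes exactly the inputs on which Python A raises (pop/peek on an exhausted token
-- list): a grammar-shaped consumability check of the tokens after the first 'WITH'.
def consumeOK : Nat → List String → Bool
  | d, [] => d == 0
  | d, t :: ts =>
    if t = "(" then
      if d = 0 ∧ ts = [] then true          -- pending '(' at end: A's loop just exits
      else consumeOK (d + 1) ts
    else if t = ")" then
      if d ≤ 1 then
        -- the top-level ')' branch: next token SELECT stops, else an alias follows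
        match ts with
        | [] => false
        | nxt :: ts1 =>
          if nxt = "SELECT" then true
          else
            match ts1 with
            | [] => false
            | _ :: ts2 =>
              if nxt = "(" then (ts2.isEmpty || consumeOK 1 ts2) else consumeOK 0 ts2
      else consumeOK (d - 1) ts
    else consumeOK d ts

def preCheck (tokens : List String) : Bool :=
  match tokens.dropWhile (fun t => t ≠ "WITH") with
  | [] => true
  | _ :: r =>
    match r with
    | _ :: r1 =>
      match r1 with
      | _ :: r2 =>
        match r2 with
        | c :: rest2 =>
          if c = "(" then (rest2.isEmpty || consumeOK 1 rest2) else consumeOK 0 rest2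
        | [] => false
      | [] => false
    | [] => false

def Pre_find_CTEs (tokens : List String) : Prop := preCheck tokens = true
instance (tokens : List String) : Decidable (Pre_find_CTEs tokens) := by unfold Pre_find_CTEs; infer_instance

def pvWitness_find_CTEs : List String :=
  ["WITH", "t", "AS", "(", "SELECT", "1", ")", ",", "u", "AS", "(", "SELECT", "2", ")", "SELECT", "*"]

def Spec_find_CTEs (tokens : List String) (out : List String) : Prop := out = find_CTEs_alt tokens
instance (tokens : List String) (out : List String) : Decidable (Spec_find_CTEs tokens out) := by unfold Spec_find_CTEs; infer_instance

-- ===== CLAIM (what is proved, stated in full; the proofs are below) =====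
def Claim_equal_find_CTEs : Prop := ∀ (tokens : List String), Dom_find_CTEs tokens → Pre_find_CTEs tokens → Spec_find_CTEs tokens (find_CTEs tokens)

-- ===== LEMMAS AND PROOFS =====

-- the ')'-branch condition of consumeOK, named for the lemmas below
def branchOK : List String → Bool
  | [] => false
  | nxt :: ts =>
    if nxt = "SELECT" then true
    else
      match ts with
      | [] => false
      | _ :: ts2 =>
        if nxt = "(" then (ts2.isEmpty || consumeOK 1 ts2) else consumeOK 0 ts2

lemma dropToWithA_eq (tokens : List String) :
    dropToWithA tokens = tokens.dropWhile (fun t => t ≠ "WITH") := by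
  induction tokens with
  | nil => rfl
  | cons t ts ih =>
    by_cases h : t = "WITH" <;> simp [dropToWithA, List.dropWhile, h, ih]

-- unfolding equations for the ports and the precondition scanner
lemma loopB_open (ts : List String) (d : Nat) (acc : List String) :
    loopB ("(" :: ts) d acc = loopB ts (d + 1) acc := by
  conv_lhs => rw [loopB.eq_def]
  simp

lemma loopB_close_big (ts : List String) (d : Nat) (acc : List String) (h : 1 < d) :
    loopB (")" :: ts) d acc = loopB ts (d - 1) acc := by
  conv_lhs => rw [loopB.eq_def]
  simp [h]

lemma loopB_branch (ts : List String) (d : Nat) (acc : List String) (h : ¬ 1 < d) :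
    loopB (")" :: ts) d acc =
      (match ts with
       | [] => []
       | nxt :: ts2 =>
         if nxt = "SELECT" then acc
         else
           match ts2 with
           | [] => []
           | al :: ts3 => loopB ts3 (if nxt = "(" then 1 else 0) (acc ++ [al])) := by
  conv_lhs => rw [loopB.eq_def]
  simp [h]

lemma loopB_other (t : String) (ts : List String) (d : Nat) (acc : List String)
    (h1 : t ≠ "(") (h2 : t ≠ ")") : loopB (t :: ts) d acc = loopB ts d acc := by
  conv_lhs => rw [loopB.eq_def]
  simp [h1, h2]

lemma consumeOK_open (d : Nat) (ts : List String) (h : ¬ (d = 0 ∧ ts = [])) :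
    consumeOK d ("(" :: ts) = consumeOK (d + 1) ts := by
  conv_lhs => rw [consumeOK.eq_def]
  simp [h]

lemma consumeOK_close (d : Nat) (ts : List String) :
    consumeOK d (")" :: ts) = if d ≤ 1 then branchOK ts else consumeOK (d - 1) ts := by
  match ts with
  | [] =>
    conv_lhs => rw [consumeOK.eq_def]
    simp [branchOK]
  | [nxt] =>
    conv_lhs => rw [consumeOK.eq_def]
    simp [branchOK]
  | nxt :: x :: ts2 =>
    conv_lhs => rw [consumeOK.eq_def]
    simp [branchOK]

lemma consumeOK_other (d : Nat) (t : String) (ts : List String)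
    (h1 : t ≠ "(") (h2 : t ≠ ")") : consumeOK d (t :: ts) = consumeOK d ts := by
  conv_lhs => rw [consumeOK.eq_def]
  simp [h1, h2]

lemma eatA_length_le : ∀ (fuel : Nat) (ts r : List String), eatA fuel ts = some r → r.length ≤ ts.length := by
  intro fuel
  induction fuel with
  | zero => intro ts r h; simp [eatA] at h
  | succ fuel ih =>
    intro ts r h
    match ts with
    | [] => simp [eatA] at h
    | cur :: rest =>
      by_cases h2 : cur = ")"
      · simp [eatA, h2] at h
        simp [← h, h2]
      · by_cases h1 : cur = "("
        · simp [eatA, h1] at h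
          cases heq : eatA fuel rest with
          | none => rw [heq] at h; simp at h
          | some v =>
            rw [heq] at h
            match v with
            | [] => simp at h
            | x :: u =>
              simp at h
              have hv := ih rest (x :: u) heq
              have hr := ih u r h
              simp at hv
              simp [h1]
              omega
        · simp [eatA, h1, h2] at h
          have := ih rest r h
          simp
          omega

-- the eat_subquery region: consumeOK at depth d ≥ 1 guarantees eatA succeeds, returns the
-- unmatched ')' at the head, loopB's depth scan lands at the same place, and the
-- post-state condition holds.
lemma eat_lemma : ∀ (fuel : Nat) (ts : List String) (d : Nat), ts.length < fuel → 1 ≤ d →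
    consumeOK d ts = true →
    ∃ u, eatA fuel ts = some (")" :: u) ∧
      (∀ acc, loopB ts d acc = loopB (")" :: u) d acc) ∧
      (if d = 1 then branchOK u else consumeOK (d - 1) u) = true := by
  intro fuel
  induction fuel with
  | zero => intro ts d h; omega
  | succ fuel ih =>
    intro ts d hlen hd hc
    match ts with
    | [] =>
      exfalso
      rw [consumeOK.eq_def] at hc
      simp at hc
      omega
    | t :: rest =>
      by_cases h2 : t = ")"
      · subst h2
        refine ⟨rest, by simp [eatA], fun acc => rfl, ?_⟩
        rw [consumeOK_close] at hc
        by_cases hd1 : d = 1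
        · simpa [hd1] using hc
        · have : ¬ d ≤ 1 := by omega
          simp [this] at hc
          simpa [hd1] using hc
      · by_cases h1 : t = "("
        · subst h1
          rw [consumeOK_open d rest (by rintro ⟨h, _⟩; omega)] at hc
          have hlen1 : rest.length < fuel := by simp at hlen; omega
          obtain ⟨u1, heat1, hloop1, hpost1⟩ := ih rest (d + 1) hlen1 (by omega) hc
          have hpost1' : consumeOK d u1 = true := by
            have hne : ¬ (d + 1 = 1) := by omega
            rw [if_neg hne] at hpost1
            simpa using hpost1
          have hu1len : u1.length < fuel := by
            have := eatA_length_le fuel rest (")" :: u1) heat1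
            simp at this
            omega
          obtain ⟨u2, heat2, hloop2, hpost2⟩ := ih u1 d hu1len hd hpost1'
          refine ⟨u2, ?_, ?_, hpost2⟩
          · simp only [eatA, heat1]
            simp [heat2]
          · intro acc
            rw [loopB_open, hloop1, loopB_close_big _ _ _ (by omega)]
            simpa using hloop2 acc
        · rw [consumeOK_other d t rest h1 h2] at hc
          have hlen1 : rest.length < fuel := by simp at hlen; omega
          obtain ⟨u, heat, hloop, hpost⟩ := ih rest d hlen1 hd hc
          refine ⟨u, ?_, ?_, hpost⟩
          · simpa [eatA, h1, h2] using heat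
          · intro acc
            rw [loopB_other t rest d acc h1 h2]
            exact hloop acc

lemma main_lemma : ∀ (fuel : Nat) (tokens : List String) (cur : String) (acc : List String),
    tokens.length < fuel →
    (if cur = "(" then (tokens.isEmpty || consumeOK 1 tokens) else consumeOK 0 tokens) = true →
    findLoopA fuel cur acc tokens = some (loopB tokens (if cur = "(" then 1 else 0) acc) := by
  intro fuel
  induction fuel with
  | zero => intro tokens cur acc h hc; omega
  | succ fuel ih =>
    intro tokens cur acc hlen hc
    match tokens with
    | [] => simp [findLoopA, loopB]
    | t :: ts =>
      by_cases hcur : cur = "("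
      · subst hcur
        have hc' : consumeOK 1 (t :: ts) = true := by simpa using hc
        obtain ⟨u, heat, hloop, hpost⟩ :=
          eat_lemma ((t :: ts).length + 1) (t :: ts) 1 (by omega) (by omega) hc'
        have hb : branchOK u = true := by simpa using hpost
        rw [if_pos rfl, hloop]
        simp only [findLoopA, heat]
        simp only [List.length_cons, Nat.zero_lt_succ, if_pos]
        match u, hb with
        | c2 :: ts2, hb =>
          by_cases hsel : c2 = "SELECT"
          · subst hsel
            rw [loopB_branch _ _ _ (by omega)]
            simp
          · simp only [branchOK, if_neg hsel] at hb
            match ts2, hb with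
            | al :: ts3, hb =>
              have hul := eatA_length_le ((t :: ts).length + 1) (t :: ts) (")" :: c2 :: al :: ts3) heat
              have hlen3 : ts3.length < fuel := by simp at hul hlen ⊢; omega
              rw [loopB_branch _ _ _ (by omega)]
              simp only [if_neg hsel]
              try simp only [reduceIte, decide_true, String.reduceEq]
              rw [ih ts3 c2 (acc ++ [al]) hlen3 hb]
              try simp
      · rw [if_neg hcur] at hc ⊢
        simp only [findLoopA, if_neg hcur]
        simp only [List.length_cons, Nat.zero_lt_succ, if_pos]
        by_cases ht : t = ")"
        · subst ht
          rw [consumeOK_close] at hc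
          simp only [Nat.zero_le, if_pos] at hc
          match ts, hc with
          | c2 :: ts2, hc =>
            by_cases hsel : c2 = "SELECT"
            · subst hsel
              rw [loopB_branch _ _ _ (by omega)]
              simp
            · simp only [branchOK, if_neg hsel] at hc
              match ts2, hc with
              | al :: ts3, hc =>
                have hlen3 : ts3.length < fuel := by simp at hlen; omega
                rw [loopB_branch _ _ _ (by omega)]
                simp only [if_neg hsel]
                try simp only [reduceIte]
                rw [ih ts3 c2 (acc ++ [al]) hlen3 hc]
                try simp
        · by_cases ht1 : t = "("
          · subst ht1
            have hyp : (ts.isEmpty || consumeOK 1 ts) = true := by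
              cases ts with
              | nil => simp
              | cons x xs =>
                rw [consumeOK.eq_def] at hc
                simpa using hc
            have hrec := ih ts "(" acc (by simp at hlen; omega) (by simpa using hyp)
            simp only [String.reduceEq, reduceIte]
            rw [hrec, loopB_open]
            simp
          · rw [consumeOK_other 0 t ts ht1 ht] at hc
            have hrec := ih ts t acc (by simp at hlen; omega) (by rw [if_neg ht1]; exact hc)
            simp only [if_neg ht]
            rw [hrec, if_neg ht1, loopB_other t ts 0 acc ht1 ht]

-- ===== VERDICT (by name: the statement is the Claim_ definition above) =====
theorem find_CTEs_spec : Claim_equal_find_CTEs := by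
  intro tokens _ hpre
  unfold Spec_find_CTEs find_CTEs find_CTEs_alt
  rw [dropToWithA_eq]
  unfold Pre_find_CTEs preCheck at hpre
  cases hdw : tokens.dropWhile (fun t => t ≠ "WITH") with
  | nil =>
    split <;> simp
  | cons w r =>
    have hne : tokens ≠ [] := by
      intro h; subst h; simp at hdw
    rw [if_neg (by simpa using hne)]
    rw [hdw] at hpre
    match r with
    | [] => simp at hpre
    | [_] => simp at hpre
    | [_, _] => simp at hpre
    | a :: b :: c :: rest2 =>
      have hm := main_lemma (rest2.length + 1) rest2 c [a] (by omega) (by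
        by_cases hc : c = "(" <;> simp only [hc, if_pos, reduceIte] at hpre ⊢ <;>
          simpa [hc] using hpre)
      simp only [hm]
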